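-- pv_equiv track=rewrite | github.com/HumanIntelligenceStudio/OperatorOS_LatestPRD | response_synthesizer.py | _select_synthesis_template
-- ===== SOURCE A (Python) =====
-- from typing import Dict, Any, List, Optional, Tuple
--
-- def _select_synthesis_template(agent_types: List[str]) -> str:
--     """Select appropriate synthesis template based on agent types"""
--     if any(agent in ['CFO', 'CSA', 'COO', 'CRO'] for agent in agent_types):
--         return 'business_comprehensive'
--     elif any(agent in ['Legal_Expert'] for agent in agent_types):
--         return 'legal_comprehensive'
--     elif any(agent in ['Life_Coach', 'Career_Coach'] for agent in agent_types):
--         return 'personal_comprehensive'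
--     else:
--         return 'general_comprehensive'
-- ===== SOURCE B (Python) =====
-- _RANK = {'CFO': 0, 'CSA': 0, 'COO': 0, 'CRO': 0,
--          'Legal_Expert': 1,
--          'Life_Coach': 2, 'Career_Coach': 2}
-- _TEMPLATES = ('business_comprehensive', 'legal_comprehensive',
--               'personal_comprehensive', 'general_comprehensive')
--
-- def _select_synthesis_template(agent_types):
--     """Select appropriate synthesis template based on agent types"""
--     best = 3
--     for agent in agent_types:
--         r = _RANK.get(agent, 3)
--         if r < best:
--             best = r
--     return _TEMPLATES[best]
-- ===== Notes on version B (the rewrite author's own statement) =====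
-- stated objective: idiomatic
-- what changed: Replaced four priority-ordered any() scans over the list with a rank table (dict) and a single min-tracking pass, mapping the best rank found to its template.
import Mathlib
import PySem

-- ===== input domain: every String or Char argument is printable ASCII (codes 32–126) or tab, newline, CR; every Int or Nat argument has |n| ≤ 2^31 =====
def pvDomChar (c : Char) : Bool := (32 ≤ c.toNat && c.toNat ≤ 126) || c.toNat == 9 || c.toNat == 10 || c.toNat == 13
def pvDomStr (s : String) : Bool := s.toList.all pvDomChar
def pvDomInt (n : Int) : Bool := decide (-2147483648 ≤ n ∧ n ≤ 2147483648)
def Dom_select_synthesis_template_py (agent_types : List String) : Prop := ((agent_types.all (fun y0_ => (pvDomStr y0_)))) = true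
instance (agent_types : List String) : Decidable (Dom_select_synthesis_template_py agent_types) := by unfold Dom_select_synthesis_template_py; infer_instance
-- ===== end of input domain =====

-- B replaces A's four priority-ordered any() scans with a rank table and one min-tracking pass (idiomatic; same asymptotic cost).

-- ===== PORT A =====
def select_synthesis_template_py (agent_types : List String) : String :=
  if agent_types.any (fun agent => ["CFO", "CSA", "COO", "CRO"].contains agent) then
    "business_comprehensive"
  else if agent_types.any (fun agent => ["Legal_Expert"].contains agent) then
    "legal_comprehensive"
  else if agent_types.any (fun agent => ["Life_Coach", "Career_Coach"].contains agent) then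
    "personal_comprehensive"
  else
    "general_comprehensive"

-- ===== PORT B =====
def pvRankTable : PySem.Dict String Int :=
  PySem.Dict.ofList [("CFO", 0), ("CSA", 0), ("COO", 0), ("CRO", 0),
                     ("Legal_Expert", 1), ("Life_Coach", 2), ("Career_Coach", 2)]

def pvTemplates : List String :=
  ["business_comprehensive", "legal_comprehensive", "personal_comprehensive", "general_comprehensive"]

def select_synthesis_template_py_alt (agent_types : List String) : String :=
  let best := agent_types.foldl (fun best agent =>
    let r := pvRankTable.getD agent 3
    if r < best then r else best) 3
  -- _TEMPLATES[best]: best is always in [0,3] so the index is in range; getD "" only discharges the option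
  (PySem.List.pyGet? pvTemplates best).getD ""

-- ===== PRECONDITION & SPEC =====
def Spec_select_synthesis_template_py (agent_types : List String) (out : String) : Prop := out = select_synthesis_template_py_alt agent_types
instance (agent_types : List String) (out : String) : Decidable (Spec_select_synthesis_template_py agent_types out) := by unfold Spec_select_synthesis_template_py; infer_instance

-- ===== CLAIM (what is proved, stated in full; the proofs are below) =====
def Claim_equal_select_synthesis_template_py : Prop := ∀ (agent_types : List String), Dom_select_synthesis_template_py agent_types → Spec_select_synthesis_template_py agent_types (select_synthesis_template_py agent_types)

-- ===== LEMMAS AND PROOFS =====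

def pvRank (a : String) : Int := pvRankTable.getD a 3

def pvStep (b : Int) (a : String) : Int := if pvRank a < b then pvRank a else b

def pvBest (l : List String) : Int := l.foldl pvStep 3

lemma pvStep_eq_min (b : Int) (a : String) : pvStep b a = min b (pvRank a) := by
  unfold pvStep; rw [min_def]; split_ifs <;> omega

-- rank expressed through A's three membership tests
lemma pvRank_eq (a : String) :
    pvRank a =
      if ["CFO", "CSA", "COO", "CRO"].contains a then 0
      else if ["Legal_Expert"].contains a then 1
      else if ["Life_Coach", "Career_Coach"].contains a then 2
      else 3 := by
  by_cases h1 : a = "CFO" <;> by_cases h2 : a = "CSA" <;> by_cases h3 : a = "COO" <;>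
    by_cases h4 : a = "CRO" <;> by_cases h5 : a = "Legal_Expert" <;>
    by_cases h6 : a = "Life_Coach" <;> by_cases h7 : a = "Career_Coach" <;>
    first
      | (subst_vars; decide)
      | (have c1 : (("CFO":String) == a) = false := by simp [beq_eq_false_iff_ne]; exact fun e => h1 e.symm
         have c2 : (("CSA":String) == a) = false := by simp [beq_eq_false_iff_ne]; exact fun e => h2 e.symm
         have c3 : (("COO":String) == a) = false := by simp [beq_eq_false_iff_ne]; exact fun e => h3 e.symm
         have c4 : (("CRO":String) == a) = false := by simp [beq_eq_false_iff_ne]; exact fun e => h4 e.symm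
         have c5 : (("Legal_Expert":String) == a) = false := by simp [beq_eq_false_iff_ne]; exact fun e => h5 e.symm
         have c6 : (("Life_Coach":String) == a) = false := by simp [beq_eq_false_iff_ne]; exact fun e => h6 e.symm
         have c7 : (("Career_Coach":String) == a) = false := by simp [beq_eq_false_iff_ne]; exact fun e => h7 e.symm
         simp [pvRank, show pvRankTable = PySem.Dict.mk [("CFO", 0), ("CSA", 0), ("COO", 0), ("CRO", 0),
                     ("Legal_Expert", 1), ("Life_Coach", 2), ("Career_Coach", 2)] from rfl,
               PySem.Dict.getD_eq_get?_getD, c1, c2, c3, c4, c5, c6, c7,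
               List.contains_eq_mem, h1, h2, h3, h4, h5, h6, h7, PySem.Dict.get?])

lemma pvBest_cons (a : String) (l : List String) :
    pvBest (a :: l) = min (pvRank a) (pvBest l) := by
  have key : ∀ (l : List String) (x y : Int),
      l.foldl pvStep (min x y) = min x (l.foldl pvStep y) := by
    intro l
    induction l with
    | nil => intro x y; rfl
    | cons c t ih =>
      intro x y
      simp only [List.foldl_cons, pvStep_eq_min, min_assoc, ih]
  have h : pvBest (a :: l) = l.foldl pvStep (min (pvRank a) 3) := by
    simp [pvBest, pvStep_eq_min, min_comm]
  rw [h, key]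
  rfl

-- the fold computes exactly the best (smallest) priority rank present, 3 if none
lemma pvBest_eq (l : List String) :
    pvBest l =
      if l.any (fun a => ["CFO", "CSA", "COO", "CRO"].contains a) then 0
      else if l.any (fun a => ["Legal_Expert"].contains a) then 1
      else if l.any (fun a => ["Life_Coach", "Career_Coach"].contains a) then 2
      else 3 := by
  induction l with
  | nil => rfl
  | cons a t ih =>
    rw [pvBest_cons, ih, pvRank_eq]
    simp only [List.any_cons]
    have key2 : ∀ (b1 b2 b3 c1 c2 c3 : Bool),
        min (if b1 then (0:Int) else if b2 then 1 else if b3 then 2 else 3)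
            (if c1 then (0:Int) else if c2 then 1 else if c3 then 2 else 3)
        = (if (b1 || c1) then (0:Int) else if (b2 || c2) then 1 else if (b3 || c3) then 2 else 3) := by
      decide
    exact key2 _ _ _ _ _ _

-- ===== VERDICT (by name: the statement is the Claim_ definition above) =====
theorem select_synthesis_template_py_spec : Claim_equal_select_synthesis_template_py := by
  intro l _
  show select_synthesis_template_py l = select_synthesis_template_py_alt l
  unfold select_synthesis_template_py select_synthesis_template_py_alt
  rw [show l.foldl (fun best agent =>
        let r := pvRankTable.getD agent 3
        if r < best then r else best) 3 = pvBest l from rfl, pvBest_eq]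
  split_ifs <;> rfl
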